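-- pv_equiv track=rewrite | github.com/turvik0/algorithms_mipt | week11_12/27.py | answerr
-- ===== SOURCE A (Python) =====
-- def answerr(strng):
--     checkk = 0
--     for i in range(len(strng) - 1):
--         if strng[i + 1] - strng[i] == 1:
--             checkk += 1
--     if strng[-1] == len(strng):
--         checkk += 1
--     if strng[0] == 1:
--         checkk += 1
--     return len(strng) + 1 - checkk
-- ===== SOURCE B (Python) =====
-- def answerr(strng):
--     # Run-segmentation: skip over each maximal run of consecutive values in the
--     # sentinel-padded sequence; the answer is the number of runs minus one.
--     seq = [0] + list(strng) + [len(strng) + 1]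
--     runs = 0
--     i = 0
--     while i < len(seq):
--         runs += 1
--         while i + 1 < len(seq) and seq[i + 1] == seq[i] + 1:
--             i += 1
--         i += 1
--     return runs - 1
-- ===== Notes on version B (the rewrite author's own statement) =====
-- stated objective: alternative
-- what changed: B segments the sentinel-padded sequence into maximal runs of consecutive values with a nested run-skipping while loop and returns runs-1, instead of A's single index loop that counts adjacent +1 matches, adds two boundary tests and subtracts from len+1.
-- outside the precondition, e.g. on answerr([]): A raises IndexError, B returns 0
import Mathlib
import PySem

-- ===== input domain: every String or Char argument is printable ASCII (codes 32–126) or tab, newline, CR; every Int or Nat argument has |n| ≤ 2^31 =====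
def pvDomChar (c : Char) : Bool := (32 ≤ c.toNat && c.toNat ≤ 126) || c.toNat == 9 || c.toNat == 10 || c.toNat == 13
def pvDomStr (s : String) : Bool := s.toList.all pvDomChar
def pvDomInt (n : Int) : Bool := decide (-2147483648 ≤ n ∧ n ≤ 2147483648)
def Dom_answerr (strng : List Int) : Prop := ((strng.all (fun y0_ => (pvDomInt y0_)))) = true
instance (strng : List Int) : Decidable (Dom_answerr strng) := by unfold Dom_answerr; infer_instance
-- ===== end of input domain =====

-- B segments the sentinel-padded sequence into maximal runs of consecutive values
-- (nested run-skipping loop, answer = runs - 1) instead of A's match count subtracted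
-- from len+1 (objective: alternative).

-- ===== PORT A =====
-- pyGetD is exact here: Pre_ (strng ≠ []) excludes the IndexError on the empty list,
-- and the loop's indices are always in range.
def answerr (strng : List Int) : Int :=
  let n : Int := strng.length
  let checkk : Int :=
    (PySem.List.pyRange 0 (n - 1) 1).foldl
      (fun c i =>
        if PySem.List.pyGetD strng (i + 1) 0 - PySem.List.pyGetD strng i 0 = 1 then c + 1 else c) 0
  let checkk := if PySem.List.pyGetD strng (-1) 0 = n then checkk + 1 else checkk
  let checkk := if PySem.List.pyGetD strng 0 0 = 1 then checkk + 1 else checkk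
  n + 1 - checkk

-- ===== PORT B =====
-- inner while loop of Source B: advance i to the end of the maximal consecutive run at i
-- (fuel seq.length only makes the recursion structural; it never runs out)
def innerB (seq : List Int) : Nat → Nat → Nat
  | 0, i => i
  | f + 1, i =>
    if i + 1 < seq.length ∧ seq.getD (i + 1) 0 = seq.getD i 0 + 1 then innerB seq f (i + 1)
    else i

-- outer while loop of Source B: count the maximal runs (fuel seq.length + 1 never runs out)
def outerB (seq : List Int) : Nat → Nat → Int → Int
  | 0, _, runs => runs
  | f + 1, i, runs =>
    if i < seq.length then outerB seq f (innerB seq seq.length i + 1) (runs + 1)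
    else runs

def answerr_alt (strng : List Int) : Int :=
  let seq : List Int := 0 :: (strng ++ [(strng.length : Int) + 1])
  outerB seq (seq.length + 1) 0 0 - 1

-- ===== PRECONDITION & SPEC =====
-- Pre_ excludes only the empty list, on which A raises IndexError reading its last element.
def Pre_answerr (strng : List Int) : Prop := strng ≠ []
instance (strng : List Int) : Decidable (Pre_answerr strng) := by unfold Pre_answerr; infer_instance
def pvWitness_answerr : List Int := [1, 2, 5]

def Spec_answerr (strng : List Int) (out : Int) : Prop := out = answerr_alt strng
instance (strng : List Int) (out : Int) : Decidable (Spec_answerr strng out) := by unfold Spec_answerr; infer_instance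

-- ===== CLAIM (what is proved, stated in full; the proofs are below) =====
def Claim_equal_answerr : Prop := ∀ (strng : List Int), Dom_answerr strng → Pre_answerr strng → Spec_answerr strng (answerr strng)

-- ===== LEMMAS AND PROOFS =====

def pairsOf (xs : List Int) : List (Int × Int) := xs.zip xs.tail

-- the number of gaps (adjacent pairs with difference ≠ 1) in a sequence
def gapCount (xs : List Int) : Int :=
  ((pairsOf xs).countP (fun p => decide (p.2 - p.1 ≠ 1)) : Nat)

theorem pairsOf_cons_cons (a b : Int) (r : List Int) :
    pairsOf (a :: b :: r) = (a, b) :: pairsOf (b :: r) := rfl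

theorem countAdj_eq (l : List Int) :
    (List.range (l.length - 1)).countP
        (fun k => decide (l.getD (k + 1) 0 - l.getD k 0 = 1))
      = (pairsOf l).countP (fun p => decide (p.2 - p.1 = 1)) := by
  induction l with
  | nil => rfl
  | cons a t ih =>
    cases t with
    | nil => rfl
    | cons b t' =>
      rw [pairsOf_cons_cons, List.countP_cons]
      simp only [List.length_cons, Nat.add_sub_cancel] at ih ⊢
      rw [List.range_succ_eq_map, List.countP_cons, List.countP_map]
      have hc : (List.range t'.length).countP
          ((fun k => decide ((a :: b :: t').getD (k + 1) 0 - (a :: b :: t').getD k 0 = 1)) ∘ Nat.succ)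
          = (List.range t'.length).countP
            (fun k => decide ((b :: t').getD (k + 1) 0 - (b :: t').getD k 0 = 1)) := by
        apply List.countP_congr
        intro k _
        simp [Function.comp]
      rw [hc, ih]
      simp [List.getD]

theorem pairsOf_snoc (a m : Int) (l : List Int) :
    pairsOf (a :: (l ++ [m])) = pairsOf (a :: l) ++ [((a :: l).getLast (by simp), m)] := by
  induction l generalizing a with
  | nil => rfl
  | cons b t ih =>
    have h1 : (a :: ((b :: t) ++ [m])) = a :: b :: (t ++ [m]) := by simp
    rw [h1, pairsOf_cons_cons, ih b, pairsOf_cons_cons]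
    simp [List.getLast_cons]

theorem length_pairsOf (xs : List Int) : (pairsOf xs).length = xs.length - 1 := by
  induction xs with
  | nil => rfl
  | cons a t ih =>
    cases t with
    | nil => rfl
    | cons b t' =>
      rw [pairsOf_cons_cons, List.length_cons, ih]
      simp

theorem countP_ne_eq (ps : List (Int × Int)) :
    ((ps.countP (fun p => decide (p.2 - p.1 ≠ 1)) : Nat) : Int)
      = ps.length - ps.countP (fun p => decide (p.2 - p.1 = 1)) := by
  induction ps with
  | nil => rfl
  | cons q t ih =>
    rw [List.countP_cons, List.countP_cons, List.length_cons]
    simp only [decide_not] at ih ⊢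
    by_cases h : q.2 - q.1 = 1 <;>
      simp only [h, decide_true, decide_false, Bool.not_true, Bool.not_false] <;>
      push_cast at ih ⊢ <;> omega

theorem loopA (l : List Int) :
    (PySem.List.pyRange 0 ((l.length : Int) - 1) 1).foldl
      (fun c i =>
        if PySem.List.pyGetD l (i + 1) 0 - PySem.List.pyGetD l i 0 = 1 then c + 1 else c) 0
      = ((pairsOf l).countP (fun p => decide (p.2 - p.1 = 1)) : Int) := by
  rw [PySem.List.foldl_ite_add_one, zero_add]
  cases l with
  | nil => rfl
  | cons a t =>
    have h1 : ((a :: t).length : Int) - 1 = ((t.length : Nat) : Int) := by simp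
    rw [h1, PySem.List.pyRange_zero_natCast, List.countP_map]
    congr 1
    have h2 : t.length = (a :: t).length - 1 := by simp
    rw [h2, ← countAdj_eq]
    apply List.countP_congr
    intro k _
    have hk : ((k : Int) + 1) = ((k + 1 : Nat) : Int) := by push_cast; ring
    simp only [Function.comp_apply]
    rw [hk, PySem.List.pyGetD_natCast, PySem.List.pyGetD_natCast]

-- A's value on a nonempty list is the gap count of the sentinel-padded sequence
theorem answerr_eq_gapCount (a : Int) (l : List Int) :
    answerr (a :: l) = gapCount (0 :: ((a :: l) ++ [((a :: l).length : Int) + 1])) := by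
  unfold answerr gapCount
  simp only []
  rw [loopA]
  have hbig : (a :: l) ++ [((a :: l).length : Int) + 1]
      = a :: (l ++ [((a :: l).length : Int) + 1]) := by simp
  have hseq : pairsOf (0 :: ((a :: l) ++ [((a :: l).length : Int) + 1]))
      = (0, a) :: pairsOf ((a :: l) ++ [((a :: l).length : Int) + 1]) := by
    rw [hbig]; rfl
  rw [hseq, List.countP_cons]
  rw [hbig, pairsOf_snoc, List.countP_append, List.countP_cons, List.countP_nil]
  rw [PySem.List.pyGetD_neg_one (a :: l) 0 (by simp), PySem.List.pyGetD_zero_cons]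
  set C := (pairsOf (a :: l)).countP (fun p => decide (p.2 - p.1 = 1)) with hC
  set Cne := (pairsOf (a :: l)).countP (fun p => decide (p.2 - p.1 ≠ 1)) with hCne
  have hlen : ((pairsOf (a :: l)).length : Int) = (l.length : Int) := by
    rw [length_pairsOf]; simp
  have hsum : ((Cne : Nat) : Int) = (l.length : Int) - C := by
    rw [hCne, countP_ne_eq, ← hC, hlen]
  have hCle : (C : Int) ≤ (l.length : Int) := by
    rw [← hlen]; exact_mod_cast List.countP_le_length
  simp only [List.length_cons, decide_not]
  push_cast [hsum] at *
  split_ifs <;> simp_all <;> push_cast <;> omega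

-- gaps of the sequence counted from index i on (matches gapCount on suffixes)
def gapsFrom (seq : List Int) (i : Nat) : Nat :=
  if i + 1 < seq.length then
    (if seq.getD (i + 1) 0 - seq.getD i 0 ≠ 1 then 1 else 0) + gapsFrom seq (i + 1)
  else 0
termination_by seq.length - i

theorem innerB_step (seq : List Int) (i f : Nat)
    (h : ¬ (i + 1 < seq.length ∧ seq.getD (i + 1) 0 = seq.getD i 0 + 1)) :
    innerB seq f i = i := by
  cases f with
  | zero => rfl
  | succ f => rw [innerB, if_neg h]

theorem innerB_stable (seq : List Int) (f : Nat) : ∀ (f' i : Nat),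
    seq.length - i ≤ f → seq.length - i ≤ f' → innerB seq f i = innerB seq f' i := by
  induction f with
  | zero =>
    intro f' i h _
    have hc : ¬ (i + 1 < seq.length ∧ seq.getD (i + 1) 0 = seq.getD i 0 + 1) := by
      intro hc; have := hc.1; omega
    rw [innerB_step seq i 0 hc, innerB_step seq i f' hc]
  | succ a ih =>
    intro f' i h hf'
    by_cases hc : i + 1 < seq.length ∧ seq.getD (i + 1) 0 = seq.getD i 0 + 1
    · obtain ⟨b, rfl⟩ : ∃ b, f' = b + 1 := ⟨f' - 1, by have := hc.1; omega⟩
      rw [innerB, if_pos hc, innerB, if_pos hc]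
      exact ih b (i + 1) (by omega) (by omega)
    · rw [innerB_step seq i _ hc, innerB_step seq i _ hc]

theorem outerB_exit (seq : List Int) (g i : Nat) (runs : Int) (h : ¬ i < seq.length) :
    outerB seq g i runs = runs := by
  cases g with
  | zero => rfl
  | succ g => rw [outerB, if_neg h]

theorem outerB_eq (seq : List Int) (i : Nat) (runs : Int) (f : Nat)
    (hi : i < seq.length) (hf : seq.length - i ≤ f) :
    outerB seq f i runs = runs + 1 + gapsFrom seq i := by
  obtain ⟨g, rfl⟩ : ∃ g, f = g + 1 := ⟨f - 1, by omega⟩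
  by_cases h : i + 1 < seq.length ∧ seq.getD (i + 1) 0 = seq.getD i 0 + 1
  · -- consecutive: an inner-loop step; one run continues
    have hin : innerB seq seq.length i = innerB seq seq.length (i + 1) := by
      obtain ⟨m, hm⟩ : ∃ m, seq.length = m + 1 := ⟨seq.length - 1, by omega⟩
      conv_lhs => rw [hm]
      rw [innerB, if_pos h]
      exact innerB_stable seq m seq.length (i + 1) (by omega) (by omega)
    have hstep : outerB seq (g + 1) i runs = outerB seq (g + 1) (i + 1) runs := by
      rw [outerB, outerB, if_pos hi, if_pos h.1, hin]
    have hne : ¬ (seq.getD (i + 1) 0 - seq.getD i 0 ≠ 1) := by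
      have := h.2; omega
    have hgf : gapsFrom seq i = gapsFrom seq (i + 1) := by
      rw [gapsFrom, if_pos h.1, if_neg hne, zero_add]
    rw [hstep, outerB_eq seq (i + 1) runs (g + 1) h.1 (by omega), hgf]
  · -- the run ends at i: count it, continue at i + 1
    have hinner : innerB seq seq.length i = i := innerB_step seq i seq.length h
    rw [outerB, if_pos hi, hinner]
    by_cases h1 : i + 1 < seq.length
    · have hgap : seq.getD (i + 1) 0 - seq.getD i 0 ≠ 1 := by
        intro habs; exact h ⟨h1, by omega⟩
      rw [outerB_eq seq (i + 1) (runs + 1) g h1 (by omega)]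
      conv_rhs => rw [gapsFrom]
      rw [if_pos h1, if_pos hgap]
      push_cast; ring
    · rw [outerB_exit seq g (i + 1) (runs + 1) h1, gapsFrom, if_neg h1]
      simp
termination_by seq.length - i
decreasing_by all_goals omega

theorem gapsFrom_cons (a : Int) (r : List Int) (i : Nat) :
    gapsFrom (a :: r) (i + 1) = gapsFrom r i := by
  conv_lhs => rw [gapsFrom]
  conv_rhs => rw [gapsFrom]
  by_cases h : i + 1 < r.length
  · have h' : i + 1 + 1 < (a :: r).length := by simp only [List.length_cons]; omega
    rw [if_pos h', if_pos h, gapsFrom_cons a r (i + 1)]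
    simp [List.getD]
  · have h' : ¬ (i + 1 + 1 < (a :: r).length) := by simp only [List.length_cons]; omega
    rw [if_neg h', if_neg h]
termination_by r.length - i
decreasing_by omega

theorem gapsFrom_eq_gapCount (seq : List Int) :
    ((gapsFrom seq 0 : Nat) : Int) = gapCount seq := by
  induction seq with
  | nil => rw [gapsFrom]; simp [gapCount, pairsOf]
  | cons a t ih =>
    cases t with
    | nil => rw [gapsFrom]; simp [gapCount, pairsOf]
    | cons b t' =>
      rw [gapsFrom]
      have h01 : 0 + 1 < (a :: b :: t').length := by simp
      rw [if_pos h01, gapsFrom_cons]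
      unfold gapCount at ih ⊢
      rw [pairsOf_cons_cons, List.countP_cons]
      by_cases hg : b - a = 1 <;>
        simp [hg, List.getD] at ih ⊢ <;> omega

-- B's value is the gap count of the sentinel-padded sequence
theorem alt_eq_gapCount (strng : List Int) :
    answerr_alt strng = gapCount (0 :: (strng ++ [(strng.length : Int) + 1])) := by
  unfold answerr_alt
  simp only []
  rw [outerB_eq _ 0 0 _ (by simp) (by omega)]
  rw [← gapsFrom_eq_gapCount]
  ring

-- ===== VERDICT (by name: the statement is the Claim_ definition above) =====
theorem answerr_spec : Claim_equal_answerr := by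
  intro strng _ hpre
  unfold Spec_answerr
  cases strng with
  | nil => exact absurd rfl hpre
  | cons a l =>
    rw [alt_eq_gapCount, answerr_eq_gapCount]
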